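-- pv_equiv track=rewrite | github.com/DEEKSHANT-123/Compititive-Coding | GFG/Day1/Q2Cheacking_Array_Equal_or_Not.py | check
-- ===== SOURCE A (Python) =====
-- def check(A,B,N):
--     freq_A, freq_B = {}, {}
--     for i in range(N):
--         if A[i] in freq_A:
--             freq_A[A[i]] += 1
--         else:
--             freq_A[A[i]] = 1
--
--     for j in range(N):
--         if B[j] in freq_B:
--             freq_B[B[j]] += 1
--         else:
--             freq_B[B[j]] = 1
--
--     for key, value in freq_A.items():
--         if freq_B.get(key) != value:
--                 return 0
--     return 1
-- ===== SOURCE B (Python) =====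
-- def check(A, B, N):
--     n = max(N, 0)
--     return 1 if sorted(A[:n]) == sorted(B[:n]) else 0
-- ===== Notes on version B (the rewrite author's own statement) =====
-- stated objective: alternative
-- what changed: Replaces the two frequency-dict building loops and the key-by-key comparison with sort-then-compare on the two N-element prefixes; trades expected O(N) hashing for O(N log N) sorting in exchange for a two-line implementation.
import Mathlib
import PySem

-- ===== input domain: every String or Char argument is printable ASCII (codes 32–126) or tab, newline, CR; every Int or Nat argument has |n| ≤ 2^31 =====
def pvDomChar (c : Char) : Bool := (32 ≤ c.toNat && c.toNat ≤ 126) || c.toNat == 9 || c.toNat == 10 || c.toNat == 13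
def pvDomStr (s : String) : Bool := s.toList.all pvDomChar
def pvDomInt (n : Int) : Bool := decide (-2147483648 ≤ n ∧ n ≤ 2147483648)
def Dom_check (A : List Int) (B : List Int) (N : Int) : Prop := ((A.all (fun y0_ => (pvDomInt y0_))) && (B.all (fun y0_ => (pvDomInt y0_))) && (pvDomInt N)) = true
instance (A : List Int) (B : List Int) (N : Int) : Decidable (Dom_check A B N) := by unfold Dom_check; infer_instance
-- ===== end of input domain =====

-- B replaces A's two frequency-dict loops + key-by-key comparison with sort-then-compare
-- on the two N-element prefixes (alternative decomposition, not claimed faster).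

-- ===== PORT A =====
-- the two counting loops of A are the same code on (A, N) and (B, N); one helper, used twice
def pvFreq (xs : List Int) (N : Int) : PySem.Dict Int Int :=
  (PySem.List.pyRange 0 N 1).foldl
    (fun d i =>
      let x := PySem.List.pyGetD xs i 0   -- xs[i]; Pre_check excludes the IndexError
      if d.contains x then d.insert x (d.getD x 0 + 1) else d.insert x 1)
    PySem.Dict.empty

-- 'for key, value in freq_A.items(): if freq_B.get(key) != value: return 0 / return 1'
def pvCmpLoop (fB : PySem.Dict Int Int) : List (Int × Int) → Int
  | [] => 1
  | (k, v) :: rest => if fB.get? k ≠ some v then 0 else pvCmpLoop fB rest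

def check (A : List Int) (B : List Int) (N : Int) : Int :=
  pvCmpLoop (pvFreq B N) (pvFreq A N).items

-- ===== PORT B =====
def check_alt (A : List Int) (B : List Int) (N : Int) : Int :=
  let n := max N 0
  if (PySem.List.sorted (PySem.List.slice A none (some n)) (fun x => x) false) =
     (PySem.List.sorted (PySem.List.slice B none (some n)) (fun x => x) false) then 1 else 0

-- ===== PRECONDITION & SPEC =====
-- A raises IndexError when N exceeds either list's length; exactly those inputs are excluded.
def Pre_check (A : List Int) (B : List Int) (N : Int) : Prop :=
  N ≤ (A.length : Int) ∧ N ≤ (B.length : Int)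
instance (A : List Int) (B : List Int) (N : Int) : Decidable (Pre_check A B N) := by
  unfold Pre_check; infer_instance

def pvWitness_check : List Int × List Int × Int := ([1, 2, 2], [2, 1, 2], 3)

def Spec_check (A : List Int) (B : List Int) (N : Int) (out : Int) : Prop := out = check_alt A B N
instance (A : List Int) (B : List Int) (N : Int) (out : Int) : Decidable (Spec_check A B N out) := by unfold Spec_check; infer_instance

-- ===== CLAIM (what is proved, stated in full; the proofs are below) =====
def Claim_equal_check : Prop := ∀ (A : List Int) (B : List Int) (N : Int), Dom_check A B N → Pre_check A B N → Spec_check A B N (check A B N)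

-- ===== LEMMAS AND PROOFS =====

-- reading the whole prefix: [xs[i] for i in range(n)] = xs.take n (n ≤ len xs)
theorem pv_map_getD_range (xs : List Int) (n : Nat) (h : n ≤ xs.length) :
    (List.range n).map (fun j => xs.getD j 0) = xs.take n := by
  apply List.ext_getElem
  · simp [h]
  · intro i h1 h2
    simp only [List.getElem_map, List.getElem_range, List.getElem_take]
    rw [List.getD_eq_getElem]

-- A's counting loop builds Counter(xs[:N])
theorem pvFreq_eq_counter (xs : List Int) (N : Int) (h : N ≤ (xs.length : Int)) :
    pvFreq xs N = PySem.Dict.counter (xs.take N.toNat) := by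
  rcases le_or_gt 0 N with hN | hN
  · obtain ⟨n, rfl⟩ : ∃ n : Nat, N = (n : Int) := ⟨N.toNat, (Int.toNat_of_nonneg hN).symm⟩
    unfold pvFreq
    have hbody : (fun (d : PySem.Dict Int Int) (i : Int) =>
        let x := PySem.List.pyGetD xs i 0
        if d.contains x then d.insert x (d.getD x 0 + 1) else d.insert x 1) =
        (fun d i => d.insert (PySem.List.pyGetD xs i 0) (d.getD (PySem.List.pyGetD xs i 0) 0 + 1)) := by
      funext d i
      set x := PySem.List.pyGetD xs i 0 with hx
      by_cases hc : d.contains x = true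
      · simp [hc]
      · simp only [Bool.not_eq_true] at hc
        simp [hc, PySem.Dict.getD_of_not_contains d 0 hc]
    rw [hbody, PySem.List.pyRange_zero_natCast n,
        List.foldl_map (f := fun k : Nat => (k : Int))
          (g := fun (d : PySem.Dict Int Int) i =>
            d.insert (PySem.List.pyGetD xs i 0) (d.getD (PySem.List.pyGetD xs i 0) 0 + 1))]
    have hn : n ≤ xs.length := by omega
    have hbody2 : (fun (d : PySem.Dict Int Int) (k : Nat) =>
        d.insert (PySem.List.pyGetD xs (k : Int) 0) (d.getD (PySem.List.pyGetD xs (k : Int) 0) 0 + 1)) =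
        (fun d k => d.insert (xs.getD k 0) (d.getD (xs.getD k 0) 0 + 1)) := by
      funext d k; simp [PySem.List.pyGetD_natCast]
    rw [hbody2,
        ← List.foldl_map (f := fun k : Nat => xs.getD k 0)
          (g := fun (d : PySem.Dict Int Int) x => d.insert x (d.getD x 0 + 1)),
        pv_map_getD_range xs n hn, PySem.Dict.foldl_insert_getD_add_one_eq_counter,
        Int.toNat_natCast]
  · have h1 : PySem.List.pyRange 0 N 1 = [] := by
      simp [PySem.List.pyRange]; omega
    have h2 : N.toNat = 0 := by omega
    simp [pvFreq, h1, h2, PySem.Dict.counter]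

-- the comparison loop is an 'all' check returning 1/0
theorem pvCmpLoop_eq (fB : PySem.Dict Int Int) (l : List (Int × Int)) :
    pvCmpLoop fB l = if ∀ p ∈ l, fB.get? p.1 = some p.2 then 1 else 0 := by
  induction l with
  | nil => simp [pvCmpLoop]
  | cons p rest ih =>
    obtain ⟨k, v⟩ := p
    by_cases h : fB.get? k = some v
    · have hiff : (∀ p ∈ (k, v) :: rest, fB.get? p.1 = some p.2) ↔
          (∀ p ∈ rest, fB.get? p.1 = some p.2) := by simp [h]
      simp only [pvCmpLoop, h, ih, ne_eq, not_true_eq_false, if_false, hiff]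
    · simp [pvCmpLoop, h]

-- looking a key up in Counter(b)
theorem pv_get?_counter (b : List Int) (k : Int) (v : Int) :
    (PySem.Dict.counter b).get? k = some v ↔ k ∈ b ∧ v = (b.count k : Int) := by
  rw [PySem.Dict.get?_eq_some_iff_mem_items _ _ _ (PySem.Dict.nodup_keys_counter b),
      PySem.Dict.items_counter]
  constructor
  · intro h
    rcases List.mem_map.1 h with ⟨j, hj, hjk⟩
    injection hjk with h1 h2
    subst h1; subst h2
    exact ⟨(PySem.Set.mem_ofList b j).1 hj, rfl⟩
  · rintro ⟨hk, rfl⟩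
    exact List.mem_map.2 ⟨k, (PySem.Set.mem_ofList b k).2 hk, rfl⟩

-- A's acceptance condition is multiset equality of the prefixes
theorem pv_cond_iff_perm (a b : List Int) (hlen : a.length = b.length) :
    (∀ p ∈ (PySem.Dict.counter a).items, (PySem.Dict.counter b).get? p.1 = some p.2) ↔ a.Perm b := by
  constructor
  · intro h
    have hcnt : ∀ k ∈ a, (a.count k : Int) = (b.count k : Int) := by
      intro k hk
      have hp : (k, (a.count k : Int)) ∈ (PySem.Dict.counter a).items := by
        rw [PySem.Dict.items_counter]
        exact List.mem_map.2 ⟨k, (PySem.Set.mem_ofList a k).2 hk, rfl⟩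
      have := (pv_get?_counter b k _).1 (h _ hp)
      exact this.2
    have hsub : a.Subperm b := by
      rw [List.subperm_ext_iff]
      intro x hx
      exact le_of_eq (by exact_mod_cast hcnt x hx)
    exact List.Subperm.perm_of_length_le hsub (le_of_eq hlen.symm)
  · intro hperm p hp
    rw [PySem.Dict.items_counter] at hp
    rcases List.mem_map.1 hp with ⟨k, hk, rfl⟩
    rw [pv_get?_counter]
    refine ⟨hperm.mem_iff.1 ((PySem.Set.mem_ofList a k).1 hk), ?_⟩
    dsimp only
    exact_mod_cast hperm.count_eq k

-- ===== VERDICT (by name: the statement is the Claim_ definition above) =====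
theorem check_spec : Claim_equal_check := by
  intro A B N _ hpre
  obtain ⟨hA, hB⟩ := hpre
  unfold Spec_check check check_alt
  dsimp only
  rw [pvFreq_eq_counter A N hA, pvFreq_eq_counter B N hB, pvCmpLoop_eq]
  have hmax : (0 : Int) ≤ max N 0 := le_max_right _ _
  rw [PySem.List.slice_to A hmax, PySem.List.slice_to B hmax]
  have htn : (max N 0).toNat = N.toNat := by omega
  rw [htn]
  set a := A.take N.toNat
  set b := B.take N.toNat
  have hlen : a.length = b.length := by
    simp only [a, b, List.length_take]; omega
  by_cases hc : a.Perm b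
  · rw [if_pos ((pv_cond_iff_perm a b hlen).2 hc),
        if_pos ((PySem.List.sorted_id_eq_sorted_id_iff_perm a b).2 hc)]
  · rw [if_neg (fun h => hc ((pv_cond_iff_perm a b hlen).1 h)),
        if_neg (fun h => hc ((PySem.List.sorted_id_eq_sorted_id_iff_perm a b).1 h))]
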